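-- pv_equiv track=rewrite | github.com/renaism/syllable-tagger | src/testing/syllabification.py | mismatch_count
-- ===== SOURCE A (Python) =====
-- def mismatch_count(pred_syl, truth_syl):
--     pred_n  = len(pred_syl)
--     truth_n = len(truth_syl)
--
--     i = 0
--     j = 0
--     count = 0
--     start_i = 0
--
--     for i in range(truth_n):
--         j = 0
--         s = 0
--
--         while(s < start_i and j < pred_n-1):
--             s += len(pred_syl[j])
--             j += 1
--
--         if truth_syl[i] != pred_syl[j]:
--             count += 1
--
--         start_i += len(truth_syl[i])
--
--     return count
-- ===== SOURCE B (Python) =====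
-- def mismatch_count(pred_syl, truth_syl):
--     # prefix[k] = total length of the first k predicted syllables
--     prefix = [0]
--     s = 0
--     for p in pred_syl:
--         s += len(p)
--         prefix.append(s)
--     last = len(pred_syl) - 1
--     count = 0
--     start = 0
--     for t in truth_syl:
--         # binary search: smallest j in [0, last] with prefix[j] >= start
--         lo, hi = 0, last
--         while lo < hi:
--             mid = (lo + hi) // 2
--             if prefix[mid] < start:
--                 lo = mid + 1
--             else:
--                 hi = mid
--         if t != pred_syl[lo]:
--             count += 1
--         start += len(t)
--     return count
-- ===== Notes on version B (the rewrite author's own statement) =====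
-- stated objective: faster
-- what changed: B precomputes a prefix-sum array of pred syllable lengths once and replaces A's per-truth-syllable linear rescan of pred from index 0 by a binary search (lower bound) for the syllable covering each truth offset; Pre_ excludes only pred_syl=[] with nonempty truth_syl, where both A and B raise IndexError.
import Mathlib
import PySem

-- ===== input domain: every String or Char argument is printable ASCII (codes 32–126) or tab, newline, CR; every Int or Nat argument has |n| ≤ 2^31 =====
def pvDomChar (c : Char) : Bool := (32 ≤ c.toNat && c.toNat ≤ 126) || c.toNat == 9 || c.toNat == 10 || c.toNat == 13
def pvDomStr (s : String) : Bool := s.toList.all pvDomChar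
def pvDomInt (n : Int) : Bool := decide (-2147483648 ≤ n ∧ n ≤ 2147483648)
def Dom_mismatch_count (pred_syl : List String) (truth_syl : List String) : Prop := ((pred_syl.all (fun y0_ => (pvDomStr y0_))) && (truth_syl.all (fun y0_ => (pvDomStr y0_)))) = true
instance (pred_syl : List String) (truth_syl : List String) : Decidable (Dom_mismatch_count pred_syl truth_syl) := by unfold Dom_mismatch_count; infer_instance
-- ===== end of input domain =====

-- B replaces A's per-truth-syllable rescan of pred from index 0 by a prefix-sum array built once
-- plus a binary search (lower bound) per truth syllable: O(n + m log n) instead of O(n*m).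


-- ===== PORT A =====
-- inner `while s < start_i and j < pred_n-1`: the bound `j < pred_n-1` is carried as the fuel
-- `(pred_n-1) - j` (Python's `pred_n-1` may be -1; the Nat subtraction 0 matches, j ≥ 0).
def mcWhile (pred_syl : List String) (start_i : Int) (fuel : Nat) (s : Int) (j : Nat) : Int × Nat :=
  match fuel with
  | 0 => (s, j)
  | f + 1 =>
    if s < start_i then
      mcWhile pred_syl start_i f (s + PySem.Str.len (PySem.List.pyGetD pred_syl (j : Int) "")) (j + 1)
    else (s, j)

-- one iteration of A's `for i in range(truth_n)` body, state = (count, start_i)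
def mcStepA (pred_syl : List String) (st : Int × Int) (t : String) : Int × Int :=
  let sj := mcWhile pred_syl st.2 (pred_syl.length - 1) 0 0
  ((if t ≠ PySem.List.pyGetD pred_syl (sj.2 : Int) "" then st.1 + 1 else st.1),
   st.2 + PySem.Str.len t)

def mismatch_count (pred_syl : List String) (truth_syl : List String) : Int :=
  (truth_syl.foldl (mcStepA pred_syl) (0, 0)).1

-- ===== PORT B =====
-- Python B's first loop: prefix = [0]; s = 0; for p in pred_syl: s += len(p); prefix.append(s)
def mcPrefixStep (st : List Int × Int) (p : String) : List Int × Int :=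
  (st.1 ++ [st.2 + PySem.Str.len p], st.2 + PySem.Str.len p)

def mcPrefix (pred_syl : List String) : List Int :=
  (pred_syl.foldl mcPrefixStep ([0], 0)).1

-- Python B's `while lo < hi` binary search; the fuel (= last, ≥ hi - lo which strictly shrinks)
-- only makes the loop structurally terminating.
def mcBsearch (pfx : List Int) (start : Int) (fuel : Nat) (lo hi : Nat) : Nat :=
  match fuel with
  | 0 => lo
  | f + 1 =>
    if lo < hi then
      let mid := (lo + hi) / 2  -- Python (lo+hi)//2: Nat division is exact here (lo, hi ≥ 0)
      if PySem.List.pyGetD pfx (mid : Int) 0 < start then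
        mcBsearch pfx start f (mid + 1) hi
      else
        mcBsearch pfx start f lo mid
    else lo

-- one iteration of B's `for t in truth_syl` body, state = (count, start)
def mcStepB (pred_syl : List String) (pfx : List Int) (last : Nat) (st : Int × Int) (t : String) : Int × Int :=
  let j := mcBsearch pfx st.2 last 0 last
  ((if t ≠ PySem.List.pyGetD pred_syl (j : Int) "" then st.1 + 1 else st.1),
   st.2 + PySem.Str.len t)

def mismatch_count_alt (pred_syl : List String) (truth_syl : List String) : Int :=
  let pfx := mcPrefix pred_syl
  let last := pred_syl.length - 1
  (truth_syl.foldl (mcStepB pred_syl pfx last) (0, 0)).1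

-- ===== PRECONDITION & SPEC =====
-- Pre_ excludes exactly the inputs where Python A raises IndexError: pred_syl = [] with a
-- nonempty truth_syl (pred_syl[j] with j = 0); Python B raises there too.
def Pre_mismatch_count (pred_syl : List String) (truth_syl : List String) : Prop :=
  pred_syl ≠ [] ∨ truth_syl = []
instance (pred_syl : List String) (truth_syl : List String) : Decidable (Pre_mismatch_count pred_syl truth_syl) := by unfold Pre_mismatch_count; infer_instance
def pvWitness_mismatch_count : List String × List String := (["ab", "c"], ["a", "bc"])

def Spec_mismatch_count (pred_syl : List String) (truth_syl : List String) (out : Int) : Prop := out = mismatch_count_alt pred_syl truth_syl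
instance (pred_syl : List String) (truth_syl : List String) (out : Int) : Decidable (Spec_mismatch_count pred_syl truth_syl out) := by unfold Spec_mismatch_count; infer_instance

-- ===== CLAIM (what is proved, stated in full; the proofs are below) =====
def Claim_equal_mismatch_count : Prop := ∀ (pred_syl : List String) (truth_syl : List String), Dom_mismatch_count pred_syl truth_syl → Pre_mismatch_count pred_syl truth_syl → Spec_mismatch_count pred_syl truth_syl (mismatch_count pred_syl truth_syl)

-- ===== LEMMAS AND PROOFS =====

-- proof-side view of the prefix sums: total length of the first k predicted syllables
def mcPfun (pred : List String) (k : Nat) : Int := ((pred.take k).map PySem.Str.len).sum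

theorem str_len_nonneg (t : String) : 0 ≤ PySem.Str.len t := by
  simp [PySem.Str.len_eq]

theorem mcPfun_succ (pred : List String) (k : Nat) (h : k < pred.length) :
    mcPfun pred (k + 1) = mcPfun pred k + PySem.Str.len (PySem.List.pyGetD pred (k : Int) "") := by
  rw [PySem.List.pyGetD_natCast]
  have hm : k < (List.map PySem.Str.len pred).length := by simpa using h
  unfold mcPfun
  rw [List.map_take, List.map_take, List.take_add_one, List.getElem?_eq_getElem hm]
  simp [List.getD, List.getElem?_eq_getElem h]

theorem mcPfun_le_succ (pred : List String) (k : Nat) : mcPfun pred k ≤ mcPfun pred (k + 1) := by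
  rcases Nat.lt_or_ge k pred.length with h | h
  · rw [mcPfun_succ pred k h]
    have := str_len_nonneg (PySem.List.pyGetD pred (k : Int) "")
    omega
  · simp [mcPfun, List.take_of_length_le h, List.take_of_length_le (Nat.le_succ_of_le h)]

theorem mcPfun_mono (pred : List String) {k l : Nat} (h : k ≤ l) : mcPfun pred k ≤ mcPfun pred l := by
  induction l with
  | zero =>
    have : k = 0 := by omega
    simp [this]
  | succ n ih =>
    rcases Nat.lt_or_ge k (n + 1) with h' | h'
    · exact le_trans (ih (by omega)) (mcPfun_le_succ pred n)
    · have : k = n + 1 := by omega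
      simp [this]

theorem mcPfun_cons (p : String) (ps : List String) (k : Nat) :
    mcPfun (p :: ps) (k + 1) = PySem.Str.len p + mcPfun ps k := by
  simp [mcPfun]

theorem mcPrefix_aux (ps : List String) : ∀ (acc : List Int) (s : Int),
    (ps.foldl mcPrefixStep (acc, s)).1 =
      acc ++ (List.range ps.length).map (fun k => s + mcPfun ps (k + 1)) := by
  induction ps with
  | nil => intro acc s; simp
  | cons p rest ih =>
    intro acc s
    simp only [List.foldl_cons, mcPrefixStep, ih, List.length_cons, List.range_succ_eq_map,
      List.map_cons, List.map_map]
    rw [List.append_assoc, List.singleton_append]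
    congr 1
    congr 1
    apply List.map_congr_left
    intro k _
    simp only [Function.comp, Nat.succ_eq_add_one, mcPfun_cons]
    ring

theorem mcPrefix_get (pred : List String) (k : Nat) (h : k ≤ pred.length) :
    PySem.List.pyGetD (mcPrefix pred) (k : Int) 0 = mcPfun pred k := by
  rw [PySem.List.pyGetD_natCast]
  unfold mcPrefix
  rw [mcPrefix_aux pred [0] 0]
  cases k with
  | zero => simp [mcPfun]
  | succ n =>
    have hn : n < pred.length := by omega
    rw [List.singleton_append, show ((0:Int) :: (List.range pred.length).map
      (fun k => 0 + mcPfun pred (k + 1))).getD (n+1) 0 = ((List.range pred.length).map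
      (fun k => 0 + mcPfun pred (k + 1))).getD n 0 from rfl]
    simp [List.getD, hn]

-- the common specification of the scanned/searched index: the clamped lower bound of `stop`
-- among the prefix sums
theorem lb_unique (pred : List String) (stop : Int) (last r₁ r₂ : Nat)
    (h₁ : r₁ ≤ last ∧ (∀ k, k < r₁ → mcPfun pred k < stop) ∧ (stop ≤ mcPfun pred r₁ ∨ r₁ = last))
    (h₂ : r₂ ≤ last ∧ (∀ k, k < r₂ → mcPfun pred k < stop) ∧ (stop ≤ mcPfun pred r₂ ∨ r₂ = last)) :
    r₁ = r₂ := by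
  obtain ⟨hle₁, hlt₁, hst₁⟩ := h₁
  obtain ⟨hle₂, hlt₂, hst₂⟩ := h₂
  by_contra hne
  rcases Nat.lt_or_ge r₁ r₂ with h | h
  · have := hlt₂ r₁ h
    rcases hst₁ with h' | h' <;> omega
  · have hlt : r₂ < r₁ := by omega
    have := hlt₁ r₂ hlt
    rcases hst₂ with h' | h' <;> omega

-- A's inner while loop, started at s = prefix-sum(j), computes that lower bound
theorem mcWhile_spec (pred : List String) (stop : Int) :
    ∀ (fuel j : Nat), j + fuel < pred.length →
      j ≤ (mcWhile pred stop fuel (mcPfun pred j) j).2 ∧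
      (mcWhile pred stop fuel (mcPfun pred j) j).2 ≤ j + fuel ∧
      (∀ k, j ≤ k → k < (mcWhile pred stop fuel (mcPfun pred j) j).2 → mcPfun pred k < stop) ∧
      (stop ≤ mcPfun pred (mcWhile pred stop fuel (mcPfun pred j) j).2 ∨
        (mcWhile pred stop fuel (mcPfun pred j) j).2 = j + fuel) := by
  intro fuel
  induction fuel with
  | zero =>
    intro j _
    have hrw : (mcWhile pred stop 0 (mcPfun pred j) j).2 = j := rfl
    rw [hrw]
    exact ⟨le_rfl, by omega, fun k h1 h2 => by omega, Or.inr (by omega)⟩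
  | succ f ih =>
    intro j hj
    by_cases hs : mcPfun pred j < stop
    · have hrw : mcWhile pred stop (f + 1) (mcPfun pred j) j
          = mcWhile pred stop f (mcPfun pred (j + 1)) (j + 1) := by
        rw [mcPfun_succ pred j (by omega)]
        simp [mcWhile, hs]
      have hih := ih (j + 1) (by omega)
      rw [hrw]
      refine ⟨by omega, by omega, ?_, ?_⟩
      · intro k h1 h2
        rcases Nat.eq_or_lt_of_le h1 with h' | h'
        · rw [← h']; exact hs
        · exact hih.2.2.1 k h' h2
      · rcases hih.2.2.2 with h' | h'
        · exact Or.inl h'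
        · exact Or.inr (by omega)
    · have hrw : (mcWhile pred stop (f + 1) (mcPfun pred j) j).2 = j := by
        simp [mcWhile, hs]
      rw [hrw]
      exact ⟨le_rfl, by omega, fun k h1 h2 => by omega, Or.inl (by omega)⟩

-- B's binary search maintains the lower-bound bracket and lands on the same index
theorem mcBsearch_spec (pred : List String) (stop : Int) :
    ∀ (fuel lo hi : Nat), hi - lo ≤ fuel → lo ≤ hi → hi ≤ pred.length - 1 →
      (∀ k, k < lo → mcPfun pred k < stop) →
      (stop ≤ mcPfun pred hi ∨ hi = pred.length - 1) →
      mcBsearch (mcPrefix pred) stop fuel lo hi ≤ pred.length - 1 ∧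
      (∀ k, k < mcBsearch (mcPrefix pred) stop fuel lo hi → mcPfun pred k < stop) ∧
      (stop ≤ mcPfun pred (mcBsearch (mcPrefix pred) stop fuel lo hi) ∨
        mcBsearch (mcPrefix pred) stop fuel lo hi = pred.length - 1) := by
  intro fuel
  induction fuel with
  | zero =>
    intro lo hi hf hlh hhi hlo hbr
    have : lo = hi := by omega
    subst this
    exact ⟨hhi, hlo, hbr⟩
  | succ f ih =>
    intro lo hi hf hlh hhi hlo hbr
    by_cases h : lo < hi
    · have hmid₁ : lo ≤ (lo + hi) / 2 := by omega
      have hmid₂ : (lo + hi) / 2 < hi := by omega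
      have hmle : (lo + hi) / 2 ≤ pred.length := by omega
      by_cases hc : PySem.List.pyGetD (mcPrefix pred) (((lo + hi) / 2 : Nat) : Int) 0 < stop
      · have hrw : mcBsearch (mcPrefix pred) stop (f + 1) lo hi
            = mcBsearch (mcPrefix pred) stop f ((lo + hi) / 2 + 1) hi := by
          simp only [mcBsearch]
          rw [if_pos h, if_pos hc]
        rw [hrw]
        rw [mcPrefix_get pred _ hmle] at hc
        refine ih ((lo + hi) / 2 + 1) hi (by omega) (by omega) hhi ?_ hbr
        intro k hk
        rcases Nat.lt_or_ge k lo with h' | h'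
        · exact hlo k h'
        · exact lt_of_le_of_lt (mcPfun_mono pred (by omega : k ≤ (lo + hi) / 2)) hc
      · have hrw : mcBsearch (mcPrefix pred) stop (f + 1) lo hi
            = mcBsearch (mcPrefix pred) stop f lo ((lo + hi) / 2) := by
          simp only [mcBsearch]
          rw [if_pos h, if_neg hc]
        rw [hrw]
        rw [mcPrefix_get pred _ hmle] at hc
        exact ih lo ((lo + hi) / 2) (by omega) (by omega) (by omega) hlo (Or.inl (by omega))
    · have : lo = hi := by omega
      subst this
      have hrw : mcBsearch (mcPrefix pred) stop (f + 1) lo lo = lo := by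
        simp [mcBsearch]
      rw [hrw]
      exact ⟨hhi, hlo, hbr⟩

-- the two step functions agree on every state
theorem step_eq (pred : List String) (st : Int × Int) (t : String) :
    mcStepA pred st t = mcStepB pred (mcPrefix pred) (pred.length - 1) st t := by
  by_cases hnil : pred = []
  · subst hnil; rfl
  · have hlen : 1 ≤ pred.length := List.length_pos_of_ne_nil hnil
    have hA := mcWhile_spec pred st.2 (pred.length - 1) 0 (by omega)
    have hB := mcBsearch_spec pred st.2 (pred.length - 1) 0 (pred.length - 1)
      (by omega) (by omega) (by omega) (fun k hk => by omega) (Or.inr rfl)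
    have h0 : mcPfun pred 0 = 0 := by simp [mcPfun]
    rw [h0] at hA
    have hj : (mcWhile pred st.2 (pred.length - 1) 0 0).2
        = mcBsearch (mcPrefix pred) st.2 (pred.length - 1) 0 (pred.length - 1) := by
      refine lb_unique pred st.2 (pred.length - 1) _ _ ?_ ?_
      · have hub := hA.2.1
        refine ⟨by omega, fun k hk => hA.2.2.1 k (by omega) hk, ?_⟩
        rcases hA.2.2.2 with h' | h'
        · exact Or.inl h'
        · exact Or.inr (by omega)
      · exact hB
    simp only [mcStepA, mcStepB, hj]

-- ===== VERDICT (by name: the statement is the Claim_ definition above) =====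
theorem mismatch_count_spec : Claim_equal_mismatch_count := by
  intro pred truth _ _
  unfold Spec_mismatch_count mismatch_count mismatch_count_alt
  have h : mcStepA pred = mcStepB pred (mcPrefix pred) (pred.length - 1) :=
    funext fun st => funext fun t => step_eq pred st t
  rw [h]
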